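-- pv_equiv track=rewrite | github.com/YutoOkawa/BoxCounter | openbox.py | box_calu
-- ===== SOURCE A (Python) =====
-- def box_calu(box):
--     sum = 0
--     box1 = 1600
--     box2to4 = 2400
--     box4to44 = 2000
--     box44toEX = 6000
--
--     for i in range(box):
--         if i == 0:
--             sum += box1
--         elif i > 0 and i < 4:
--             sum += box2to4
--         elif i >= 4 and i < 44:
--             sum += box4to44
--         elif i >= 44:
--             sum += box44toEX
--     return sum
-- ===== SOURCE B (Python) =====
-- def box_calu(box):
--     n = max(box, 0)
--     return (1600 * min(n, 1)
--             + 2400 * (min(n, 4) - min(n, 1))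
--             + 2000 * (min(n, 44) - min(n, 4))
--             + 6000 * (n - min(n, 44)))
-- ===== Notes on version B (the rewrite author's own statement) =====
-- stated objective: faster
-- what changed: Replaces the per-index loop over range(box) with a closed-form piecewise sum: count the indices falling in each price tier with min/max and multiply by the tier price.
import Mathlib
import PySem

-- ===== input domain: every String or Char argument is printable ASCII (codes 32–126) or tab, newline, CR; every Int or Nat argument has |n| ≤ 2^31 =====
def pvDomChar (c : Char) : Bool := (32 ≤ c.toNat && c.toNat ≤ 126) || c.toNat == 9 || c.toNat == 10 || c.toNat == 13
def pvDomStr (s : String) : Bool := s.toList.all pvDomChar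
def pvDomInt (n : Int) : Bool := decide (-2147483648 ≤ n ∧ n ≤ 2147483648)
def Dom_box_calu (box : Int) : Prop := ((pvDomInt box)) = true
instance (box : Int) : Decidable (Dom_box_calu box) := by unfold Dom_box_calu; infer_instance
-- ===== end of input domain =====

-- B replaces A's per-index loop with a closed-form piecewise sum (tier counts via min/max); objective: faster.


-- ===== PORT A =====
def box_calu (box : Int) : Int :=
  (PySem.List.pyRange 0 box 1).foldl (fun sum i =>
    if i == 0 then sum + 1600
    else if i > 0 && i < 4 then sum + 2400
    else if i ≥ 4 && i < 44 then sum + 2000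
    else if i ≥ 44 then sum + 6000
    else sum) 0

-- ===== PORT B =====
def box_calu_alt (box : Int) : Int :=
  let n := max box 0
  1600 * min n 1 + 2400 * (min n 4 - min n 1) + 2000 * (min n 44 - min n 4)
    + 6000 * (n - min n 44)

-- ===== PRECONDITION & SPEC =====
def Spec_box_calu (box : Int) (out : Int) : Prop := out = box_calu_alt box
instance (box : Int) (out : Int) : Decidable (Spec_box_calu box out) := by unfold Spec_box_calu; infer_instance

-- ===== CLAIM (what is proved, stated in full; the proofs are below) =====
def Claim_equal_box_calu : Prop := ∀ (box : Int), Dom_box_calu box → Spec_box_calu box (box_calu box)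

-- ===== LEMMAS AND PROOFS =====
theorem box_calu_nat (n : Nat) : box_calu (n : Int) = box_calu_alt (n : Int) := by
  induction n with
  | zero => decide
  | succ k ih =>
    unfold box_calu at *
    rw [show ((k + 1 : Nat) : Int) = (k : Int) + 1 by push_cast; ring,
        PySem.List.pyRange_one_succ_right (by positivity), List.foldl_append]
    simp only [List.foldl]
    rw [ih]
    unfold box_calu_alt
    simp only []
    split_ifs with h1 h2 h3 h4 <;>
      simp_all only [beq_iff_eq, Bool.and_eq_true, decide_eq_true_eq] <;> omega

theorem box_calu_total (box : Int) : box_calu box = box_calu_alt box := by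
  rcases Int.lt_or_le 0 box with h | h
  · obtain ⟨n, rfl⟩ : ∃ n : Nat, box = (n : Int) :=
      ⟨box.toNat, (Int.toNat_of_nonneg h.le).symm⟩
    exact box_calu_nat n
  · unfold box_calu box_calu_alt
    rw [PySem.List.pyRange_one_eq_nil h]
    simp only [List.foldl_nil]
    omega

-- ===== VERDICT (by name: the statement is the Claim_ definition above) =====
theorem box_calu_spec : Claim_equal_box_calu := by
  intro box _
  exact box_calu_total box
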